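-- pv_equiv track=rewrite | github.com/tastelikefeet/twinkle | src/twinkle/template/utils.py | split_by_subsequence
-- ===== SOURCE A (Python) =====
-- from typing import TYPE_CHECKING, Any, Callable, Dict, List, Optional, Tuple
--
-- def find_subsequence(seq: List[int], subseq: List[int], start: int = 0) -> int:
--     """Find the first index of `subseq`"""
--     subseq_len = len(subseq)
--     for i in range(start, len(seq) - subseq_len + 1):
--         if seq[i:i + subseq_len] == subseq:
--             return i
--     return -1
--
-- def split_by_subsequence(seq: List[int], subseq: List[int]) -> List[List[int]]:
--     """Split seq by subseq"""
--     parts = []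
--     start = 0
--     subseq_len = len(subseq)
--
--     while True:
--         pos = find_subsequence(seq, subseq, start)
--         if pos == -1:
--             parts.append(seq[start:])
--             break
--         parts.append(seq[start:pos])
--         start = pos + subseq_len
--
--     return parts
-- ===== SOURCE B (Python) =====
-- def split_by_subsequence(seq, subseq):
--     """Split seq by subseq: single left-to-right pass, no helper find() and no re-scanning slices."""
--     m = len(subseq)
--     n = len(seq)
--     parts = []
--     cur = []
--     i = 0
--     while i + m <= n:
--         if seq[i:i + m] == subseq:
--             parts.append(cur)
--             cur = []
--             i += m
--         else:
--             cur.append(seq[i])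
--             i += 1
--     cur.extend(seq[i:])
--     parts.append(cur)
--     return parts
-- ===== Notes on version B (the rewrite author's own statement) =====
-- stated objective: simpler
-- what changed: A repeatedly calls a find helper that rescans with slice comparisons and then slices out each part; B is a single left-to-right pass that either consumes a delimiter match or pushes one element into the current part, with no find helper and no part-extraction slicing. Pre_ excludes subseq = [], on which A loops forever (so does B on nonempty seq).
import Mathlib
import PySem

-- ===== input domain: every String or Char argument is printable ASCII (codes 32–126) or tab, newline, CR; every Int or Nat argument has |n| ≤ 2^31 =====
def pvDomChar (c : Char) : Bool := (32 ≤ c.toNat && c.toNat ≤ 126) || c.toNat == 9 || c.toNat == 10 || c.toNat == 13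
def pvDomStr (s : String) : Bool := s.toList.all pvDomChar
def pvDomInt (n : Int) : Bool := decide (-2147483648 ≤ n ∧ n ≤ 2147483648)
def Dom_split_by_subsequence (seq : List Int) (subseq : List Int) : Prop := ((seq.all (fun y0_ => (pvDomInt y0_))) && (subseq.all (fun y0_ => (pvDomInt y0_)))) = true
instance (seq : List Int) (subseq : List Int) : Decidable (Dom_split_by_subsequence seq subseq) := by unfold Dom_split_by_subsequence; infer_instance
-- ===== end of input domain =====

-- B simplifies A: one left-to-right pass (match-and-skip or push one element) instead of
-- repeated find-helper rescans plus part-extraction slicing. Same return values on Pre_.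

-- ===== PORT A =====
-- helper find_subsequence: the for-loop over range(start, len(seq)-len(subseq)+1)
def findSubGo (seq : List Int) (subseq : List Int) : List Int → Int
  | [] => -1
  | i :: is =>
    if PySem.List.slice seq (some i) (some (i + (subseq.length : Int))) = subseq then i
    else findSubGo seq subseq is

def find_subsequence (seq : List Int) (subseq : List Int) (start : Int) : Int :=
  findSubGo seq subseq (PySem.List.pyRange start ((seq.length : Int) - (subseq.length : Int) + 1) 1)

-- the 'while True' loop; fuel only makes it total (with subseq ≠ [] it never runs out)
def splitGo (seq : List Int) (subseq : List Int) : Nat → Int → List (List Int) → List (List Int)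
  | 0, _, parts => parts
  | fuel + 1, start, parts =>
    let pos := find_subsequence seq subseq start
    if pos = -1 then parts ++ [PySem.List.slice seq (some start) none]
    else splitGo seq subseq fuel (pos + (subseq.length : Int)) (parts ++ [PySem.List.slice seq (some start) (some pos)])

def split_by_subsequence (seq : List Int) (subseq : List Int) : List (List Int) :=
  splitGo seq subseq (seq.length + 1) 0 []

-- ===== PORT B =====
-- the single while-pass of Source B: rest = seq[i:], cur = the part being built;
-- once fewer than len(subseq) elements remain (i + m > n) the loop stops and the rest is flushed
def altGo (s : Int) (ss : List Int) : List Int → List Int → List (List Int)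
  | [], cur => [cur]
  | x :: rs, cur =>
    if (x :: rs).length < ss.length + 1 then [cur ++ (x :: rs)]
    else if (s :: ss).isPrefixOf (x :: rs) then
      cur :: altGo s ss ((x :: rs).drop (ss.length + 1)) []
    else
      altGo s ss rs (cur ++ [x])
termination_by rest _ => rest.length
decreasing_by
  all_goals simp

-- on subseq = [] the Python B does not return (outside Pre_); any total value will do here
def split_by_subsequence_alt (seq : List Int) (subseq : List Int) : List (List Int) :=
  match subseq with
  | [] => [seq]
  | s :: ss => altGo s ss seq []

-- ===== PRECONDITION & SPEC =====
-- Pre_ excludes only subseq = [], on which Python A loops forever (never returns).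
def Pre_split_by_subsequence (seq : List Int) (subseq : List Int) : Prop := subseq ≠ []
instance (seq : List Int) (subseq : List Int) : Decidable (Pre_split_by_subsequence seq subseq) := by unfold Pre_split_by_subsequence; infer_instance
def pvWitness_split_by_subsequence : List Int × List Int := ([1, 2, 3, 2, 4], [2])

def Spec_split_by_subsequence (seq : List Int) (subseq : List Int) (out : List (List Int)) : Prop := out = split_by_subsequence_alt seq subseq
instance (seq : List Int) (subseq : List Int) (out : List (List Int)) : Decidable (Spec_split_by_subsequence seq subseq out) := by unfold Spec_split_by_subsequence; infer_instance

-- ===== CLAIM (what is proved, stated in full; the proofs are below) =====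
def Claim_equal_split_by_subsequence : Prop := ∀ (seq : List Int) (subseq : List Int), Dom_split_by_subsequence seq subseq → Pre_split_by_subsequence seq subseq → Spec_split_by_subsequence seq subseq (split_by_subsequence seq subseq)

-- ===== LEMMAS AND PROOFS =====

-- index (relative to a suffix) of the first match, as an Option Nat
def fmAux (s : Int) (ss : List Int) : List Int → Option Nat
  | [] => none
  | x :: rs => if (s :: ss).isPrefixOf (x :: rs) then some 0 else (fmAux s ss rs).map (· + 1)

theorem fmAux_none_of_short (s : Int) (ss : List Int) (rest : List Int)
    (h : rest.length < ss.length + 1) : fmAux s ss rest = none := by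
  induction rest with
  | nil => rfl
  | cons x rs ih =>
    simp only [fmAux]
    have hnp : ¬ (s :: ss).isPrefixOf (x :: rs) := by
      intro hp
      have := (List.isPrefixOf_iff_prefix.mp hp).length_le
      simp at this h; omega
    rw [if_neg hnp, ih (by simp at h ⊢; omega)]
    rfl

theorem fmAux_some_prefix (s : Int) (ss : List Int) (rest : List Int) (d : Nat)
    (h : fmAux s ss rest = some d) : (s :: ss).isPrefixOf (rest.drop d) := by
  induction rest generalizing d with
  | nil => simp [fmAux] at h
  | cons x rs ih =>
    simp only [fmAux] at h
    by_cases hp : (s :: ss).isPrefixOf (x :: rs)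
    · rw [if_pos hp] at h
      cases h; simpa using hp
    · rw [if_neg hp] at h
      cases hd' : fmAux s ss rs with
      | none => rw [hd'] at h; simp at h
      | some d' =>
        rw [hd'] at h; simp at h
        subst h
        simpa using ih d' hd'

-- slice-equality at a full-length window is exactly a prefix test on the suffix
theorem slice_eq_iff_prefix (seq : List Int) (s : Int) (ss : List Int) (k : Nat) :
    PySem.List.slice seq (some (k : Int)) (some ((k : Int) + ((s :: ss).length : Int))) = s :: ss
      ↔ (s :: ss).isPrefixOf (seq.drop k) := by
  rw [PySem.List.slice_natCast_add]
  constructor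
  · intro h
    rw [List.isPrefixOf_iff_prefix]
    exact ⟨(seq.drop k).drop (s :: ss).length, by
      conv_rhs => rw [← List.take_append_drop (s :: ss).length (seq.drop k)]
      rw [h]⟩
  · intro h
    rcases List.isPrefixOf_iff_prefix.mp h with ⟨t, ht⟩
    rw [← ht, List.take_left']
    rfl

-- find_subsequence computes fmAux on the suffix
theorem find_eq_fmAux (seq : List Int) (s : Int) (ss : List Int) (k : Nat) (hk : k ≤ seq.length) :
    find_subsequence seq (s :: ss) (k : Int) =
      match fmAux s ss (seq.drop k) with
      | none => -1
      | some d => ((k + d : Nat) : Int) := by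
  by_cases hbig : seq.length < k + (s :: ss).length
  · -- range empty, suffix too short
    have hrange : PySem.List.pyRange (k : Int) ((seq.length : Int) - ((s :: ss).length : Int) + 1) 1 = [] := by
      rw [PySem.List.pyRange_one]
      have : ((seq.length : Int) - ((s :: ss).length : Int) + 1 - (k : Int)).toNat = 0 := by
        simp at hbig ⊢; omega
      rw [this]; rfl
    rw [fmAux_none_of_short s ss _ (by simp at hbig ⊢; omega)]
    simp only [find_subsequence, hrange, findSubGo]
  · rw [Nat.not_lt] at hbig
    have hlt : (k : Int) < (seq.length : Int) - ((s :: ss).length : Int) + 1 := by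
      simp at hbig ⊢; omega
    have hcons := PySem.List.pyRange_one_cons hlt
    simp only [find_subsequence, hcons, findSubGo]
    by_cases hp : (s :: ss).isPrefixOf (seq.drop k)
    · rw [if_pos ((slice_eq_iff_prefix seq s ss k).mpr hp)]
      have hne : seq.drop k ≠ [] := by
        intro h
        have := congrArg List.length h
        simp at this hbig; omega
      rcases List.exists_cons_of_ne_nil hne with ⟨x, rs, hx⟩
      rw [hx]
      simp only [fmAux]
      rw [if_pos (hx ▸ hp)]
      simp
    · rw [if_neg (fun h => hp ((slice_eq_iff_prefix seq s ss k).mp h))]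
      have hk1 : k + 1 ≤ seq.length := by simp at hbig; omega
      have hih := find_eq_fmAux seq s ss (k + 1) hk1
      have hcast : ((k : Int) + 1) = ((k + 1 : Nat) : Int) := by push_cast [List.length_cons]; ring
      simp only [find_subsequence] at hih
      rw [hcast, hih]
      have hne : seq.drop k ≠ [] := by
        intro h
        have := congrArg List.length h
        simp at this hbig; omega
      rcases List.exists_cons_of_ne_nil hne with ⟨x, rs, hx⟩
      have hrs : seq.drop (k + 1) = rs := by
        rw [← List.tail_drop, hx]
        rfl
      rw [hx]
      simp only [fmAux]
      rw [if_neg (hx ▸ hp), hrs]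
      cases fmAux s ss rs with
      | none => rfl
      | some d => simp; ring
termination_by seq.length - k
decreasing_by simp_all; omega

theorem altGo_fm_none (s : Int) (ss : List Int) (rest : List Int) (cur : List Int)
    (h : fmAux s ss rest = none) : altGo s ss rest cur = [cur ++ rest] := by
  induction rest generalizing cur with
  | nil => simp [altGo]
  | cons x rs ih =>
    simp only [fmAux] at h
    by_cases hp : (s :: ss).isPrefixOf (x :: rs)
    · rw [if_pos hp] at h; simp at h
    · rw [if_neg hp] at h
      by_cases hsh : (x :: rs).length < ss.length + 1
      · rw [altGo, if_pos hsh]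
      · rw [altGo, if_neg hsh, if_neg hp,
          ih _ (by cases hfm : fmAux s ss rs <;> simp [hfm] at h ⊢)]
        simp

theorem altGo_fm_some (s : Int) (ss : List Int) (rest : List Int) (cur : List Int) (d : Nat)
    (h : fmAux s ss rest = some d) :
    altGo s ss rest cur = (cur ++ rest.take d) :: altGo s ss (rest.drop (d + (ss.length + 1))) [] := by
  induction rest generalizing cur d with
  | nil => simp [fmAux] at h
  | cons x rs ih =>
    simp only [fmAux] at h
    have hlong : ¬ (x :: rs).length < ss.length + 1 := by
      have hpref := fmAux_some_prefix s ss (x :: rs) d (by simp only [fmAux]; exact h)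
      have := (List.isPrefixOf_iff_prefix.mp hpref).length_le
      simp at this ⊢
      omega
    by_cases hp : (s :: ss).isPrefixOf (x :: rs)
    · rw [if_pos hp] at h
      cases h
      rw [altGo, if_neg hlong, if_pos hp]
      simp
    · rw [if_neg hp] at h
      cases hfm : fmAux s ss rs with
      | none => rw [hfm] at h; simp at h
      | some d' =>
        rw [hfm] at h; simp at h
        subst h
        rw [altGo, if_neg hlong, if_neg hp, ih _ d' hfm]
        simp only [List.take_succ_cons, List.append_assoc, List.singleton_append]
        have : d' + 1 + (ss.length + 1) = (d' + (ss.length + 1)) + 1 := by omega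
        rw [this, List.drop_succ_cons]

theorem splitGo_eq_altGo (seq : List Int) (s : Int) (ss : List Int) (fuel : Nat) (k : Nat)
    (parts : List (List Int)) (hk : k ≤ seq.length) (hfuel : seq.length - k < fuel) :
    splitGo seq (s :: ss) fuel (k : Int) parts = parts ++ altGo s ss (seq.drop k) [] := by
  induction fuel generalizing k parts with
  | zero => omega
  | succ f ih =>
    simp only [splitGo, find_eq_fmAux seq s ss k hk]
    cases hfm : fmAux s ss (seq.drop k) with
    | none =>
      rw [if_pos rfl, PySem.List.slice_from_natCast, altGo_fm_none s ss _ _ hfm]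
      simp
    | some d =>
      have hne : ((k + d : Nat) : Int) ≠ -1 := by omega
      rw [if_neg hne]
      have hpref := fmAux_some_prefix s ss _ d hfm
      have hlen : (s :: ss).length ≤ ((seq.drop k).drop d).length :=
        (List.isPrefixOf_iff_prefix.mp hpref).length_le
      simp at hlen
      have hkd : k + d + (ss.length + 1) ≤ seq.length := by omega
      have hcast : ((k + d : Nat) : Int) + ((s :: ss).length : Int)
          = ((k + d + (ss.length + 1) : Nat) : Int) := by push_cast [List.length_cons]; ring
      rw [hcast, ih (k + d + (ss.length + 1)) _ hkd (by omega)]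
      rw [altGo_fm_some s ss _ [] d hfm]
      rw [PySem.List.slice_natCast]
      have h1 : (seq.drop k).take (k + d - k) = (seq.drop k).take d := by
        congr 1; omega
      have h2 : (seq.drop k).drop (d + (ss.length + 1)) = seq.drop (k + d + (ss.length + 1)) := by
        rw [List.drop_drop]; congr 1; omega
      rw [h1, h2]
      simp

-- ===== VERDICT (by name: the statement is the Claim_ definition above) =====
theorem split_by_subsequence_spec : Claim_equal_split_by_subsequence := by
  intro seq subseq _ hpre
  rcases subseq with _ | ⟨s, ss⟩
  · exact absurd rfl hpre
  · show split_by_subsequence seq (s :: ss) = split_by_subsequence_alt seq (s :: ss)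
    unfold split_by_subsequence split_by_subsequence_alt
    have h := splitGo_eq_altGo seq s ss (seq.length + 1) 0 [] (by omega) (by omega)
    simp only [Nat.cast_zero, List.drop_zero, List.nil_append] at h
    exact h
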